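-- pv_equiv track=rewrite | github.com/jakevoytko/advent2023 | 20/02.py | allModuleParents
-- ===== SOURCE A (Python) =====
-- from collections import deque, defaultdict
--
-- def allModuleParents(moduleOrigins, label):
--     parents = set()
--     queue = deque([label])
--     while len(queue) > 0:
--         l = queue.popleft()
--         parents.add(l)
--         for origin in moduleOrigins[l]:
--             if origin not in parents:
--                 queue.append(origin)
--     return parents
-- ===== SOURCE B (Python) =====
-- def allModuleParents(moduleOrigins, label):
--     # Level-synchronous (frontier) BFS: instead of a deque work-queue that re-pops
--     # duplicate entries and re-reads moduleOrigins for already-visited nodes, process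
--     # the reachable graph one frontier at a time; origins of a node are scanned only
--     # the first time the node is seen.
--     parents = set()
--     frontier = [label]
--     while frontier:
--         nextFrontier = []
--         for node in frontier:
--             if node not in parents:
--                 parents.add(node)
--                 for origin in moduleOrigins[node]:
--                     if origin not in parents:
--                         nextFrontier.append(origin)
--         frontier = nextFrontier
--     return parents
-- ===== Notes on version B (the rewrite author's own statement) =====
-- stated objective: alternative
-- what changed: The deque work-queue BFS (which re-pops duplicate queue entries and re-reads moduleOrigins for already-visited nodes) is replaced by a level-synchronous frontier BFS: each level's frontier is processed in one pass building the next frontier, and a node's origins are read only on its first visit.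
-- outside the precondition, e.g. on allModuleParents({'a': [], 'b': ['c']}, 'a'): A returns {'a'}, B returns {'a'}
import Mathlib
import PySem

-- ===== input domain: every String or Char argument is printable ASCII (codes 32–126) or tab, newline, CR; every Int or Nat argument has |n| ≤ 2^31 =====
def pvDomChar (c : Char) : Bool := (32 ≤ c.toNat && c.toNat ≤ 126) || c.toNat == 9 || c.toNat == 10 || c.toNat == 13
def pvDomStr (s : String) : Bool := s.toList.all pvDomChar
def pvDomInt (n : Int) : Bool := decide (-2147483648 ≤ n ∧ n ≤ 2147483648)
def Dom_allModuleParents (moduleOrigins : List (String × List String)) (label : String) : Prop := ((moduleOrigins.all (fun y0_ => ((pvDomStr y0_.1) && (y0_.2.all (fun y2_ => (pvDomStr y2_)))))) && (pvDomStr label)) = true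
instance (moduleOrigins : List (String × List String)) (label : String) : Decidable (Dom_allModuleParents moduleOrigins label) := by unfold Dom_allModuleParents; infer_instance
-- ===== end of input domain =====

-- B replaces A's deque work-queue BFS (which re-pops duplicate queue entries and re-reads
-- the origins of already-visited nodes) by a level-synchronous frontier BFS; proved to
-- return the identical list.



-- ===== PORT A =====
-- Transliteration of A: a FIFO queue, popping the head, adding it to the parents set,
-- and appending each origin not yet in parents.  moduleOrigins[l] is ported as
-- (Dict.get? … ).getD []: under Pre_ the key is always present, so this is exact there
-- (the KeyError inputs are excluded by Pre_).  K and the hypothesis arguments are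
-- termination scaffolding only (every queued element lies in K).

def pvOrig (mo : List (String × List String)) (l : String) : List String :=
  ((PySem.Dict.mk mo).get? l).getD []

lemma pvOrig_mem_flatten (mo : List (String × List String)) (l o : String)
    (h : o ∈ pvOrig mo l) : o ∈ (mo.map Prod.snd).flatten := by
  induction mo with
  | nil => simp [pvOrig, PySem.Dict.get?] at h
  | cons p rest ih =>
    obtain ⟨k, v⟩ := p
    rw [pvOrig, PySem.Dict.get?_mk_cons] at h
    simp only [List.map_cons, List.flatten_cons, List.mem_append]
    by_cases hk : (k == l) = true
    · simp [hk] at h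
      exact Or.inl h
    · simp [hk] at h
      exact Or.inr (ih h)

def pvK (mo : List (String × List String)) (label : String) : List String :=
  label :: (mo.map Prod.snd).flatten

lemma pvOrig_mem_K (mo : List (String × List String)) (label : String) :
    ∀ l o, o ∈ pvOrig mo l → o ∈ pvK mo label := by
  intro l o h
  exact List.mem_cons_of_mem _ (pvOrig_mem_flatten mo l o h)

def pvBfsA (mo : List (String × List String)) (K : List String)
    (hK : ∀ l o, o ∈ pvOrig mo l → o ∈ K) :
    (P : List String) → (Q : List String) → (hQ : ∀ x ∈ Q, x ∈ K) → List String
  | P, [], _ => P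
  | P, l :: Q', hQ =>
      pvBfsA mo K hK (PySem.Set.add P l)
        (Q' ++ (pvOrig mo l).filter (fun o => !(PySem.Set.contains (PySem.Set.add P l) o)))
        (by
          intro x hx
          rcases List.mem_append.mp hx with h | h
          · exact hQ x (List.mem_cons_of_mem _ h)
          · exact hK l x (List.mem_filter.mp h).1)
termination_by P Q hQ => ((K.toFinset \ P.toFinset).card, Q.countP (fun x => decide (x ∈ P)))
decreasing_by
  by_cases hl : l ∈ P
  · rw [PySem.Set.add_of_mem hl]
    apply Prod.Lex.right
    rw [List.countP_append, List.countP_cons]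
    have happ : (((pvOrig mo l).filter (fun o => !(PySem.Set.contains (PySem.Set.add P l) o))).countP (fun x => decide (x ∈ P))) = 0 := by
      rw [List.countP_eq_zero]
      intro x hx
      have hx2 := (List.mem_filter.mp hx).2
      rw [PySem.Set.add_of_mem hl] at hx2
      simp only [Bool.not_eq_eq_eq_not, Bool.not_true] at hx2
      have : x ∉ P := fun hm => by
        rw [(PySem.Set.contains_iff _ _).mpr hm] at hx2; exact Bool.false_ne_true hx2.symm
      simp [this]
    rw [PySem.Set.add_of_mem hl] at happ
    rw [happ]
    simp [hl]
  · apply Prod.Lex.left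
    have hlK : l ∈ K := hQ l List.mem_cons_self
    rw [PySem.Set.add_of_not_mem hl]
    apply Finset.card_lt_card
    constructor
    · apply Finset.sdiff_subset_sdiff (Finset.Subset.refl _)
      intro x hx
      simp at hx ⊢
      exact Or.inr hx
    · intro hsub
      have h1 : l ∈ K.toFinset \ P.toFinset := by simp [hlK, hl]
      have h2 := hsub h1
      simp at h2

def allModuleParents (moduleOrigins : List (String × List String)) (label : String) : List String :=
  pvBfsA moduleOrigins (pvK moduleOrigins label) (pvOrig_mem_K moduleOrigins label)
    [] [label] (by intro x hx; rw [List.mem_singleton] at hx; rw [hx]; exact List.mem_cons_self)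

-- ===== PORT B =====
-- Transliteration of B: pvPass is the inner 'for node in frontier' loop (returning the
-- updated parents and the accumulated nextFrontier), pvLevels the outer while loop.
-- moduleOrigins[node] is ported with the same getD [] convention as in port A.

def pvPass (mo : List (String × List String)) (P : List String) :
    List String → (List String × List String)
  | [] => (P, [])
  | node :: F' =>
      if PySem.Set.contains P node then pvPass mo P F'
      else
        ((pvPass mo (PySem.Set.add P node) F').1,
          (pvOrig mo node).filter (fun o => !(PySem.Set.contains (PySem.Set.add P node) o))
            ++ (pvPass mo (PySem.Set.add P node) F').2)

lemma pvPass_fst_mem_of (mo : List (String × List String)) (P F : List String) (x : String)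
    (hx : x ∈ P) : x ∈ (pvPass mo P F).1 := by
  induction F generalizing P with
  | nil => exact hx
  | cons node F' ih =>
    rw [pvPass]
    by_cases h : PySem.Set.contains P node
    · simp only [h, if_true]; exact ih P hx
    · simp only [h, if_false]
      exact ih _ ((PySem.Set.mem_add _ _ _).mpr (Or.inl hx))

lemma pvPass_all_mem (mo : List (String × List String)) (P F : List String)
    (h : ∀ x ∈ F, x ∈ P) : pvPass mo P F = (P, []) := by
  induction F with
  | nil => rfl
  | cons node F' ih =>
    rw [pvPass]
    have : PySem.Set.contains P node = true :=
      (PySem.Set.contains_iff _ _).mpr (h node List.mem_cons_self)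
    simp only [this, if_true]
    exact ih (fun x hx => h x (List.mem_cons_of_mem _ hx))

lemma pvPass_exists_fresh (mo : List (String × List String)) (P F : List String)
    (h : ∃ x ∈ F, x ∉ P) : ∃ x ∈ F, x ∈ (pvPass mo P F).1 ∧ x ∉ P := by
  induction F generalizing P with
  | nil => simp at h
  | cons node F' ih =>
    by_cases hn : node ∈ P
    · obtain ⟨x, hxF, hxP⟩ := h
      have hx' : ∃ x ∈ F', x ∉ P := by
        rcases List.mem_cons.mp hxF with rfl | hm
        · exact absurd hn hxP
        · exact ⟨x, hm, hxP⟩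
      obtain ⟨y, hyF, hy1, hy2⟩ := ih P hx'
      refine ⟨y, List.mem_cons_of_mem _ hyF, ?_, hy2⟩
      rw [pvPass]
      simp only [(PySem.Set.contains_iff _ _).mpr hn, if_true]
      exact hy1
    · refine ⟨node, List.mem_cons_self, ?_, hn⟩
      rw [pvPass]
      have hc : PySem.Set.contains P node = false := by
        by_contra hc
        exact hn ((PySem.Set.contains_iff _ _).mp (Bool.of_not_eq_false hc))
      simp only [hc, if_false]
      exact pvPass_fst_mem_of mo _ F' node
        ((PySem.Set.mem_add _ _ _).mpr (Or.inr rfl))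

lemma pvPass_snd_subset (mo : List (String × List String)) (K : List String)
    (hK : ∀ l o, o ∈ pvOrig mo l → o ∈ K) (P F : List String) :
    ∀ o ∈ (pvPass mo P F).2, o ∈ K := by
  induction F generalizing P with
  | nil => intro o ho; simp [pvPass] at ho
  | cons node F' ih =>
    intro o ho
    rw [pvPass] at ho
    by_cases h : PySem.Set.contains P node
    · simp only [h, if_true] at ho; exact ih P o ho
    · simp only [h, if_false] at ho
      rcases List.mem_append.mp ho with h1 | h1
      · exact hK node o (List.mem_filter.mp h1).1
      · exact ih _ o h1

def pvLevels (mo : List (String × List String)) (K : List String)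
    (hK : ∀ l o, o ∈ pvOrig mo l → o ∈ K)
    (P : List String) (F : List String) (hF : ∀ x ∈ F, x ∈ K) : List String :=
  if hni : F = [] then P
  else
    pvLevels mo K hK (pvPass mo P F).1 (pvPass mo P F).2 (pvPass_snd_subset mo K hK P F)
termination_by ((K.toFinset \ P.toFinset).card, F.length)
decreasing_by
  by_cases hall : ∀ x ∈ F, x ∈ P
  · rw [pvPass_all_mem mo P F hall]
    apply Prod.Lex.right
    simpa [List.length_pos_iff] using hni
  · apply Prod.Lex.left
    push_neg at hall
    obtain ⟨x, hxF, hx1, hx2⟩ := pvPass_exists_fresh mo P F hall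
    apply Finset.card_lt_card
    constructor
    · apply Finset.sdiff_subset_sdiff (Finset.Subset.refl _)
      intro y hy
      simp at hy ⊢
      exact pvPass_fst_mem_of mo P F y hy
    · intro hsub
      have h1 : x ∈ K.toFinset \ P.toFinset := by simp [hF x hxF, hx2]
      have h2 := hsub h1
      simp at h2
      exact h2.2 hx1

def allModuleParents_alt (moduleOrigins : List (String × List String)) (label : String) : List String :=
  pvLevels moduleOrigins (pvK moduleOrigins label) (pvOrig_mem_K moduleOrigins label)
    [] [label] (by intro x hx; rw [List.mem_singleton] at hx; rw [hx]; exact List.mem_cons_self)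

-- ===== PRECONDITION & SPEC =====
-- Pre_ excludes exactly the inputs on which Python A raises KeyError while exploring: it
-- requires the origins map to be key-closed (label and every listed origin are keys of
-- moduleOrigins).  This is slightly narrower than A's exact domain: A still returns when
-- only nodes UNREACHABLE from label lack a key; on such excluded inputs B returns the
-- same value as A (see the cite in claim.json).
def Pre_allModuleParents (moduleOrigins : List (String × List String)) (label : String) : Prop :=
  label ∈ moduleOrigins.map Prod.fst ∧
    ∀ p ∈ moduleOrigins, ∀ o ∈ p.2, o ∈ moduleOrigins.map Prod.fst

instance (moduleOrigins : List (String × List String)) (label : String) :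
    Decidable (Pre_allModuleParents moduleOrigins label) := by
  unfold Pre_allModuleParents; infer_instance

def pvWitness_allModuleParents : (List (String × List String)) × String :=
  ([("a", ["b"]), ("b", [])], "a")

def Spec_allModuleParents (moduleOrigins : List (String × List String)) (label : String) (out : List String) : Prop := out = allModuleParents_alt moduleOrigins label
instance (moduleOrigins : List (String × List String)) (label : String) (out : List String) : Decidable (Spec_allModuleParents moduleOrigins label out) := by unfold Spec_allModuleParents; infer_instance

-- ===== CLAIM (what is proved, stated in full; the proofs are below) =====
def Claim_equal_allModuleParents : Prop := ∀ (moduleOrigins : List (String × List String)) (label : String), Dom_allModuleParents moduleOrigins label → Pre_allModuleParents moduleOrigins label → Spec_allModuleParents moduleOrigins label (allModuleParents moduleOrigins label)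

-- ===== LEMMAS AND PROOFS =====

def pvDF (P : List String) (acc : List String) : List String → List String
  | [] => acc
  | x :: xs => pvDF P (if x ∈ P ∨ x ∈ acc then acc else acc ++ [x]) xs

lemma pvDF_mem_acc (P acc : List String) (os : List String) (y : String)
    (hy : y ∈ acc) : y ∈ pvDF P acc os := by
  induction os generalizing acc with
  | nil => exact hy
  | cons x xs ih =>
    rw [pvDF]
    split
    · exact ih acc hy
    · exact ih _ (List.mem_append_left _ hy)

lemma pvDF_mem_sub (P acc os : List String) (y : String)
    (hy : y ∈ pvDF P acc os) : y ∈ acc ∨ y ∈ os := by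
  induction os generalizing acc with
  | nil => exact Or.inl hy
  | cons x xs ih =>
    rw [pvDF] at hy
    rcases ih _ hy with h | h
    · split at h
      · exact Or.inl h
      · rcases List.mem_append.mp h with h1 | h1
        · exact Or.inl h1
        · exact Or.inr (List.mem_cons.mpr (Or.inl (List.mem_singleton.mp h1)))
    · exact Or.inr (List.mem_cons_of_mem _ h)

lemma pvDF_not_mem_P (P acc os : List String) (hacc : ∀ y ∈ acc, y ∉ P) :
    ∀ y ∈ pvDF P acc os, y ∉ P := by
  induction os generalizing acc with
  | nil => exact hacc
  | cons x xs ih =>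
    rw [pvDF]
    split
    · exact ih acc hacc
    · rename_i hcond
      refine ih _ ?_
      intro y hy
      rcases List.mem_append.mp hy with h | h
      · exact hacc y h
      · have hyx : y = x := by simpa using h
        subst hyx
        intro hxP
        exact hcond (Or.inl hxP)

lemma pvDF_nodup (P acc os : List String) (hacc : acc.Nodup) :
    (pvDF P acc os).Nodup := by
  induction os generalizing acc with
  | nil => exact hacc
  | cons x xs ih =>
    rw [pvDF]
    split
    · exact ih acc hacc
    · rename_i hcond
      refine ih _ ?_
      rw [List.nodup_append]
      refine ⟨hacc, List.nodup_singleton x, ?_⟩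
      intro a ha b hb
      have hbx : b = x := by simpa using hb
      subst hbx
      rintro rfl
      exact hcond (Or.inr ha)

lemma pvDF_append (P acc xs ys : List String) :
    pvDF P acc (xs ++ ys) = pvDF P (pvDF P acc xs) ys := by
  induction xs generalizing acc with
  | nil => rfl
  | cons x xs ih =>
    rw [List.cons_append, pvDF, pvDF]
    exact ih _

lemma pvDF_mem_of (P acc os : List String) (y : String)
    (hy : y ∈ os) (hyP : y ∉ P) : y ∈ pvDF P acc os := by
  induction os generalizing acc with
  | nil => simp at hy
  | cons x xs ih =>
    rw [pvDF]
    rcases List.mem_cons.mp hy with rfl | hm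
    · by_cases hc : y ∈ P ∨ y ∈ acc
      · rcases hc with h | h
        · exact absurd h hyP
        · simp only [if_pos (Or.inr h)]
          exact pvDF_mem_acc _ _ _ _ h
      · simp only [if_neg hc]
        exact pvDF_mem_acc _ _ _ _ (List.mem_append_right _ (by simp))
    · split
      · exact ih acc hm
      · exact ih _ hm

lemma pvDF_eq_of (P acc os : List String) (h : ∀ o ∈ os, o ∈ P ∨ o ∈ acc) :
    pvDF P acc os = acc := by
  induction os with
  | nil => rfl
  | cons x xs ih =>
    rw [pvDF, if_pos (h x List.mem_cons_self)]
    exact ih (fun o ho => h o (List.mem_cons_of_mem _ ho))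

lemma pvDF_shift (P acc1 acc2 os : List String) :
    pvDF P (acc1 ++ acc2) os = acc1 ++ pvDF (P ++ acc1) acc2 os := by
  induction os generalizing acc2 with
  | nil => rfl
  | cons x xs ih =>
    rw [pvDF, pvDF]
    by_cases hc : x ∈ P ∨ x ∈ acc1 ++ acc2
    · rw [if_pos hc]
      have hc' : x ∈ P ++ acc1 ∨ x ∈ acc2 := by
        rcases hc with h | h
        · exact Or.inl (List.mem_append_left _ h)
        · rcases List.mem_append.mp h with h1 | h1
          · exact Or.inl (List.mem_append_right _ h1)
          · exact Or.inr h1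
      rw [if_pos hc']
      exact ih acc2
    · rw [if_neg hc]
      have hc' : ¬ (x ∈ P ++ acc1 ∨ x ∈ acc2) := by
        intro h
        apply hc
        rcases h with h | h
        · rcases List.mem_append.mp h with h1 | h1
          · exact Or.inl h1
          · exact Or.inr (List.mem_append_left _ h1)
        · exact Or.inr (List.mem_append_right _ h)
      rw [if_neg hc']
      rw [List.append_assoc]
      exact ih (acc2 ++ [x])

lemma pvContains_eq_decide (s : List String) (x : String) :
    PySem.Set.contains s x = decide (x ∈ s) := by
  by_cases h : x ∈ s
  · rw [(PySem.Set.contains_iff _ _).mpr h]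
    simp [h]
  · have hf : PySem.Set.contains s x = false := by
      by_contra hc
      exact h ((PySem.Set.contains_iff _ _).mp (Bool.of_not_eq_false hc))
    rw [hf]
    simp [h]

lemma pvDF_filter (P acc os : List String) :
    pvDF P acc (os.filter (fun o => !(PySem.Set.contains P o))) = pvDF P acc os := by
  induction os generalizing acc with
  | nil => rfl
  | cons x xs ih =>
    rw [List.filter_cons]
    by_cases hx : x ∈ P
    · rw [pvContains_eq_decide]
      simp only [hx, decide_true, Bool.not_true, Bool.false_eq_true, if_false]
      rw [pvDF, if_pos (Or.inl hx)]
      exact ih acc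
    · rw [pvContains_eq_decide]
      simp only [hx, decide_false, Bool.not_false, if_true]
      rw [pvDF, pvDF]
      split
      · exact ih acc
      · exact ih _

def pvInv (K P W : List String) : Prop :=
  W.Nodup ∧ ∀ x ∈ W, x ∈ K ∧ x ∉ P

lemma pvInv_df (K P Q : List String) (hQ : ∀ x ∈ Q, x ∈ K) :
    pvInv K P (pvDF P [] Q) := by
  refine ⟨pvDF_nodup P [] Q List.nodup_nil, ?_⟩
  intro x hx
  refine ⟨?_, pvDF_not_mem_P P [] Q (by simp) x hx⟩
  rcases pvDF_mem_sub P [] Q x hx with h | h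
  · simp at h
  · exact hQ x h

def pvReach (mo : List (String × List String)) (K : List String)
    (hK : ∀ l o, o ∈ pvOrig mo l → o ∈ K) :
    (P : List String) → (W : List String) → (h : pvInv K P W) → List String
  | P, [], _ => P
  | P, l :: W', h =>
      pvReach mo K hK (PySem.Set.add P l)
        (pvDF (PySem.Set.add P l) W' (pvOrig mo l))
        (by
          have hl := h.2 l List.mem_cons_self
          have hadd : PySem.Set.add P l = P ++ [l] := PySem.Set.add_of_not_mem hl.2
          have hnd : W'.Nodup := (List.nodup_cons.mp h.1).2
          have hlW : l ∉ W' := (List.nodup_cons.mp h.1).1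
          refine ⟨pvDF_nodup _ _ _ hnd, ?_⟩
          intro x hx
          constructor
          · rcases pvDF_mem_sub _ _ _ x hx with h1 | h1
            · exact (h.2 x (List.mem_cons_of_mem _ h1)).1
            · exact hK l x h1
          · exact pvDF_not_mem_P _ _ _ (by
              intro y hy
              rw [hadd]
              intro hmem
              rcases List.mem_append.mp hmem with h1 | h1
              · exact (h.2 y (List.mem_cons_of_mem _ hy)).2 h1
              · have : y = l := by simpa using h1
                exact hlW (this ▸ hy)) x hx)
termination_by P W h => (K.toFinset \ P.toFinset).card
decreasing_by
  have hl := h.2 l List.mem_cons_self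
  rw [PySem.Set.add_of_not_mem hl.2]
  apply Finset.card_lt_card
  constructor
  · apply Finset.sdiff_subset_sdiff (Finset.Subset.refl _)
    intro x hx
    simp at hx ⊢
    exact Or.inr hx
  · intro hsub
    have h1 : l ∈ K.toFinset \ P.toFinset := by simp [hl.1, hl.2]
    have h2 := hsub h1
    simp at h2

lemma pvReach_congr2 (mo : List (String × List String)) (K : List String)
    (hK : ∀ l o, o ∈ pvOrig mo l → o ∈ K) (P P' W W' : List String)
    (hP : P = P') (hW : W = W') (h : pvInv K P W) (h' : pvInv K P' W') :
    pvReach mo K hK P W h = pvReach mo K hK P' W' h' := by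
  subst hP; subst hW; rfl

lemma pvReach_cons (mo : List (String × List String)) (K : List String)
    (hK : ∀ l o, o ∈ pvOrig mo l → o ∈ K) (P : List String) (l : String)
    (W' : List String) (h : pvInv K P (l :: W'))
    (h2 : pvInv K (PySem.Set.add P l) (pvDF (PySem.Set.add P l) W' (pvOrig mo l))) :
    pvReach mo K hK P (l :: W') h =
      pvReach mo K hK (PySem.Set.add P l) (pvDF (PySem.Set.add P l) W' (pvOrig mo l)) h2 := by
  rw [pvReach.eq_def]

lemma pvDF_cons_shift (P : List String) (l : String) (Q' : List String) (hl : l ∉ P) :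
    pvDF P [] (l :: Q') = l :: pvDF (P ++ [l]) [] Q' := by
  rw [pvDF, if_neg (by simp [hl])]
  show pvDF P ([l] ++ []) Q' = [l] ++ pvDF (P ++ [l]) [] Q'
  exact pvDF_shift P [l] [] Q'

lemma pvBfsA_eq_reach (mo : List (String × List String)) (K : List String)
    (hK : ∀ l o, o ∈ pvOrig mo l → o ∈ K) :
    ∀ (P Q : List String) (hQ : ∀ x ∈ Q, x ∈ K),
      (∀ x ∈ P, ∀ o ∈ pvOrig mo x, o ∈ P ∨ o ∈ Q) →
      pvBfsA mo K hK P Q hQ = pvReach mo K hK P (pvDF P [] Q) (pvInv_df K P Q hQ) := by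
  intro P Q hQ
  induction P, Q, hQ using pvBfsA.induct mo K hK with
  | case1 P x _ =>
    intro _
    rw [pvBfsA]
    have hnil : pvDF P [] ([] : List String) = [] := rfl
    rw [pvReach_congr2 mo K hK P P _ [] rfl hnil _ ⟨List.nodup_nil, by simp⟩]
    rw [pvReach]
  | case2 P l Q' hQ _ ih =>
    intro hinv
    rw [pvBfsA]
    by_cases hl : l ∈ P
    · -- l already visited: the appended origins are all already present
      have e1 : PySem.Set.add P l = P := PySem.Set.add_of_mem hl
      have hinv' : ∀ x ∈ PySem.Set.add P l, ∀ o ∈ pvOrig mo x,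
          o ∈ PySem.Set.add P l ∨
          o ∈ Q' ++ List.filter (fun o => !(PySem.Set.contains (PySem.Set.add P l) o)) (pvOrig mo l) := by
        rw [e1]
        intro x hx o ho
        rcases hinv x hx o ho with h | h
        · exact Or.inl h
        · rcases List.mem_cons.mp h with rfl | hm
          · exact Or.inl hl
          · exact Or.inr (List.mem_append_left _ hm)
      rw [ih hinv']
      apply pvReach_congr2 mo K hK _ _ _ _ e1
      -- W equality
      rw [e1]
      rw [pvDF_append]
      rw [pvDF, if_pos (Or.inl hl)]
      apply pvDF_eq_of
      intro o ho
      have ho1 := List.mem_filter.mp ho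
      have hoP : o ∉ P := by
        have := ho1.2
        rw [pvContains_eq_decide] at this
        simpa using this
      have hoQ : o ∈ Q' := by
        rcases hinv l hl o ho1.1 with h | h
        · exact absurd h hoP
        · rcases List.mem_cons.mp h with rfl | hm
          · exact absurd hl hoP
          · exact hm
      exact Or.inr (pvDF_mem_of P [] Q' o hoQ hoP)
    · -- fresh l
      have e1 : PySem.Set.add P l = P ++ [l] := PySem.Set.add_of_not_mem hl
      have hinv' : ∀ x ∈ PySem.Set.add P l, ∀ o ∈ pvOrig mo x,
          o ∈ PySem.Set.add P l ∨
          o ∈ Q' ++ List.filter (fun o => !(PySem.Set.contains (PySem.Set.add P l) o)) (pvOrig mo l) := by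
        intro x hx o ho
        by_cases hoP1 : o ∈ PySem.Set.add P l
        · exact Or.inl hoP1
        · rcases (PySem.Set.mem_add _ _ _).mp hx with hxP | rfl
          · rcases hinv x hxP o ho with h | h
            · exact absurd ((PySem.Set.mem_add _ _ _).mpr (Or.inl h)) hoP1
            · rcases List.mem_cons.mp h with rfl | hm
              · exact absurd ((PySem.Set.mem_add _ _ _).mpr (Or.inr rfl)) hoP1
              · exact Or.inr (List.mem_append_left _ hm)
          · refine Or.inr (List.mem_append_right _ ?_)
            refine List.mem_filter.mpr ⟨ho, ?_⟩
            rw [pvContains_eq_decide]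
            simpa using hoP1
      rw [ih hinv']
      have hW1 : pvDF P [] (l :: Q') = l :: pvDF (P ++ [l]) [] Q' :=
        pvDF_cons_shift P l Q' hl
      have hWeq2 : pvDF (PySem.Set.add P l) (pvDF (P ++ [l]) [] Q') (pvOrig mo l) =
          pvDF (PySem.Set.add P l) []
            (Q' ++ List.filter (fun o => !(PySem.Set.contains (PySem.Set.add P l) o)) (pvOrig mo l)) := by
        rw [e1, pvDF_append, pvDF_filter]
      have hQ'K : ∀ x ∈ (Q' ++ List.filter (fun o => !(PySem.Set.contains (PySem.Set.add P l) o)) (pvOrig mo l)), x ∈ K := by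
        intro x hx
        rcases List.mem_append.mp hx with h | h
        · exact hQ x (List.mem_cons_of_mem _ h)
        · exact hK l x (List.mem_filter.mp h).1
      have h2 : pvInv K (PySem.Set.add P l) (pvDF (PySem.Set.add P l) (pvDF (P ++ [l]) [] Q') (pvOrig mo l)) := by
        rw [hWeq2]
        exact pvInv_df K _ _ hQ'K
      have h3 : pvInv K P (l :: pvDF (P ++ [l]) [] Q') := by
        rw [← hW1]
        exact pvInv_df K P (l :: Q') hQ
      calc pvReach mo K hK (PySem.Set.add P l) (pvDF (PySem.Set.add P l) []
              (Q' ++ List.filter (fun o => !(PySem.Set.contains (PySem.Set.add P l) o)) (pvOrig mo l)))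
              (pvInv_df K (PySem.Set.add P l)
                (Q' ++ List.filter (fun o => !(PySem.Set.contains (PySem.Set.add P l) o)) (pvOrig mo l)) hQ'K) 
          = pvReach mo K hK (PySem.Set.add P l) (pvDF (PySem.Set.add P l) (pvDF (P ++ [l]) [] Q') (pvOrig mo l)) h2 :=
            pvReach_congr2 mo K hK _ _ _ _ rfl hWeq2.symm _ _
        _ = pvReach mo K hK P (l :: pvDF (P ++ [l]) [] Q') h3 :=
            (pvReach_cons mo K hK P l _ h3 h2).symm
        _ = pvReach mo K hK P (pvDF P [] (l :: Q')) (pvInv_df K P (l :: Q') hQ) :=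
            pvReach_congr2 mo K hK _ _ _ _ rfl hW1.symm _ _

lemma pvPass_inv (mo : List (String × List String)) :
    ∀ (F P N : List String),
      (∀ x ∈ P, ∀ o ∈ pvOrig mo x, o ∈ P ∨ o ∈ F ∨ o ∈ N) →
      ∀ x ∈ (pvPass mo P F).1, ∀ o ∈ pvOrig mo x,
        o ∈ (pvPass mo P F).1 ∨ o ∈ (pvPass mo P F).2 ∨ o ∈ N := by
  intro F
  induction F with
  | nil =>
    intro P N h x hx o ho
    rw [pvPass] at hx ⊢
    rcases h x hx o ho with h1 | h1 | h1
    · exact Or.inl h1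
    · simp at h1
    · exact Or.inr (Or.inr h1)
  | cons node F' ih =>
    intro P N h x hx o ho
    rw [pvPass] at hx ⊢
    by_cases hn : node ∈ P
    · have hc : PySem.Set.contains P node = true := (PySem.Set.contains_iff _ _).mpr hn
      rw [if_pos hc] at hx ⊢
      refine ih P N ?_ x hx o ho
      intro y hy o' ho'
      rcases h y hy o' ho' with h1 | h1 | h1
      · exact Or.inl h1
      · rcases List.mem_cons.mp h1 with rfl | hm
        · exact Or.inl hn
        · exact Or.inr (Or.inl hm)
      · exact Or.inr (Or.inr h1)
    · have hc : PySem.Set.contains P node = false := by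
        rw [pvContains_eq_decide]; simpa using hn
      rw [if_neg (by simp [pvContains_eq_decide, hn])] at hx ⊢
      have hprem : ∀ y ∈ PySem.Set.add P node, ∀ o' ∈ pvOrig mo y,
          o' ∈ PySem.Set.add P node ∨ o' ∈ F' ∨
          o' ∈ N ++ (pvOrig mo node).filter (fun o => !(PySem.Set.contains (PySem.Set.add P node) o)) := by
        intro y hy o' ho'
        by_cases hoP1 : o' ∈ PySem.Set.add P node
        · exact Or.inl hoP1
        · rcases (PySem.Set.mem_add _ _ _).mp hy with hyP | rfl
          · rcases h y hyP o' ho' with h1 | h1 | h1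
            · exact absurd ((PySem.Set.mem_add _ _ _).mpr (Or.inl h1)) hoP1
            · rcases List.mem_cons.mp h1 with rfl | hm
              · exact absurd ((PySem.Set.mem_add _ _ _).mpr (Or.inr rfl)) hoP1
              · exact Or.inr (Or.inl hm)
            · exact Or.inr (Or.inr (List.mem_append_left _ h1))
          · refine Or.inr (Or.inr (List.mem_append_right _ ?_))
            refine List.mem_filter.mpr ⟨ho', ?_⟩
            rw [pvContains_eq_decide]
            simpa using hoP1
      have key := ih (PySem.Set.add P node)
        (N ++ (pvOrig mo node).filter (fun o => !(PySem.Set.contains (PySem.Set.add P node) o)))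
        hprem x hx o ho
      rcases key with h1 | h1 | h1
      · exact Or.inl h1
      · exact Or.inr (Or.inl (List.mem_append_right _ h1))
      · rcases List.mem_append.mp h1 with h2 | h2
        · exact Or.inr (Or.inr h2)
        · exact Or.inr (Or.inl (List.mem_append_left _ h2))

lemma pvPass_eq_reach (mo : List (String × List String)) (K : List String)
    (hK : ∀ l o, o ∈ pvOrig mo l → o ∈ K) :
    ∀ (F P N : List String), (∀ x ∈ F, x ∈ K) → (∀ x ∈ N, x ∈ K) →
      (∀ x ∈ P, ∀ o ∈ pvOrig mo x, o ∈ P ∨ o ∈ F ∨ o ∈ N) →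
      ∀ (h1 : pvInv K P (pvDF P [] (F ++ N)))
        (h2 : pvInv K (pvPass mo P F).1 (pvDF (pvPass mo P F).1 [] (N ++ (pvPass mo P F).2))),
      pvReach mo K hK P (pvDF P [] (F ++ N)) h1 =
        pvReach mo K hK (pvPass mo P F).1 (pvDF (pvPass mo P F).1 [] (N ++ (pvPass mo P F).2)) h2 := by
  intro F
  induction F with
  | nil =>
    intro P N hF hN hinv h1 h2
    apply pvReach_congr2
    · rw [pvPass]
    · rw [pvPass]
      rw [List.nil_append, List.append_nil]
  | cons node F' ih =>
    intro P N hF hN hinv h1 h2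
    have hF' : ∀ x ∈ F', x ∈ K := fun x hx => hF x (List.mem_cons_of_mem _ hx)
    by_cases hn : node ∈ P
    · -- node already visited: skipped on both sides
      have hc : PySem.Set.contains P node = true := (PySem.Set.contains_iff _ _).mpr hn
      have hpass : pvPass mo P (node :: F') = pvPass mo P F' := by
        rw [pvPass, if_pos hc]
      have hWskip : pvDF P [] ((node :: F') ++ N) = pvDF P [] (F' ++ N) := by
        rw [List.cons_append, pvDF, if_pos (Or.inl hn)]
      have hinv' : ∀ x ∈ P, ∀ o ∈ pvOrig mo x, o ∈ P ∨ o ∈ F' ∨ o ∈ N := by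
        intro x hx o ho
        rcases hinv x hx o ho with h | h | h
        · exact Or.inl h
        · rcases List.mem_cons.mp h with rfl | hm
          · exact Or.inl hn
          · exact Or.inr (Or.inl hm)
        · exact Or.inr (Or.inr h)
      have hQK : ∀ x ∈ F' ++ N, x ∈ K := by
        intro x hx
        rcases List.mem_append.mp hx with h | h
        · exact hF' x h
        · exact hN x h
      refine Eq.trans (pvReach_congr2 mo K hK P P _ _ rfl hWskip h1 (pvInv_df K P _ hQK)) ?_
      refine Eq.trans (ih P N hF' hN hinv' (pvInv_df K P _ hQK) ?_) ?_
      · rw [← hpass] at *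
        exact h2
      · apply pvReach_congr2 <;> rw [hpass]
    · -- fresh node
      have e1 : PySem.Set.add P node = P ++ [node] := PySem.Set.add_of_not_mem hn
      have hc : PySem.Set.contains P node = false := by
        rw [pvContains_eq_decide]; simpa using hn
      have hnodeK : node ∈ K := hF node List.mem_cons_self
      have hpass : pvPass mo P (node :: F') =
          ((pvPass mo (PySem.Set.add P node) F').1,
            (pvOrig mo node).filter (fun o => !(PySem.Set.contains (PySem.Set.add P node) o))
              ++ (pvPass mo (PySem.Set.add P node) F').2) := by
        rw [pvPass, if_neg (by simp [pvContains_eq_decide, hn])]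
      have hW1 : pvDF P [] ((node :: F') ++ N) = node :: pvDF (P ++ [node]) [] (F' ++ N) := by
        rw [List.cons_append]
        exact pvDF_cons_shift P node (F' ++ N) hn
      have happK : ∀ x ∈ (pvOrig mo node).filter (fun o => !(PySem.Set.contains (PySem.Set.add P node) o)), x ∈ K := by
        intro x hx
        exact hK node x (List.mem_filter.mp hx).1
      have hNK' : ∀ x ∈ N ++ (pvOrig mo node).filter (fun o => !(PySem.Set.contains (PySem.Set.add P node) o)), x ∈ K := by
        intro x hx
        rcases List.mem_append.mp hx with h | h
        · exact hN x h
        · exact happK x h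
      have hWeq2 : pvDF (PySem.Set.add P node) (pvDF (P ++ [node]) [] (F' ++ N)) (pvOrig mo node) =
          pvDF (PySem.Set.add P node) []
            (F' ++ (N ++ (pvOrig mo node).filter (fun o => !(PySem.Set.contains (PySem.Set.add P node) o)))) := by
      -- fold in the freshly appended origins
        rw [← List.append_assoc]
        rw [pvDF_append (PySem.Set.add P node) [] (F' ++ N)]
        rw [e1, pvDF_filter]
      have hFNK : ∀ x ∈ (F' ++ N), x ∈ K := by
        intro x hx
        rcases List.mem_append.mp hx with h | h
        · exact hF' x h
        · exact hN x h
      have h3 : pvInv K P (node :: pvDF (P ++ [node]) [] (F' ++ N)) := by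
        rw [← hW1]
        exact h1
      have h4 : pvInv K (PySem.Set.add P node)
          (pvDF (PySem.Set.add P node) (pvDF (P ++ [node]) [] (F' ++ N)) (pvOrig mo node)) := by
        rw [hWeq2]
        exact pvInv_df K _ _ (by
          intro x hx
          rcases List.mem_append.mp hx with h | h
          · exact hF' x h
          · exact hNK' x h)
      have hinv' : ∀ x ∈ PySem.Set.add P node, ∀ o ∈ pvOrig mo x,
          o ∈ PySem.Set.add P node ∨ o ∈ F' ∨
          o ∈ N ++ (pvOrig mo node).filter (fun o => !(PySem.Set.contains (PySem.Set.add P node) o)) := by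
        intro y hy o' ho'
        by_cases hoP1 : o' ∈ PySem.Set.add P node
        · exact Or.inl hoP1
        · rcases (PySem.Set.mem_add _ _ _).mp hy with hyP | rfl
          · rcases hinv y hyP o' ho' with h | h | h
            · exact absurd ((PySem.Set.mem_add _ _ _).mpr (Or.inl h)) hoP1
            · rcases List.mem_cons.mp h with rfl | hm
              · exact absurd ((PySem.Set.mem_add _ _ _).mpr (Or.inr rfl)) hoP1
              · exact Or.inr (Or.inl hm)
            · exact Or.inr (Or.inr (List.mem_append_left _ h))
          · refine Or.inr (Or.inr (List.mem_append_right _ ?_))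
            refine List.mem_filter.mpr ⟨ho', ?_⟩
            rw [pvContains_eq_decide]
            simpa using hoP1
      refine Eq.trans (pvReach_congr2 mo K hK P P _ _ rfl hW1 h1 h3) ?_
      refine Eq.trans (pvReach_cons mo K hK P node _ h3 h4) ?_
      refine Eq.trans (pvReach_congr2 mo K hK _ _ _ _ rfl hWeq2 h4 (pvInv_df K _ _ (by
        intro x hx
        rcases List.mem_append.mp hx with h | h
        · exact hF' x h
        · exact hNK' x h))) ?_
      refine Eq.trans (ih (PySem.Set.add P node) _ hF' hNK' hinv' _ ?_) ?_
      · exact pvInv_df K _ _ (by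
          intro x hx
          rcases List.mem_append.mp hx with h | h
          · rcases List.mem_append.mp h with h' | h'
            · exact hNK' x (List.mem_append_left _ h')
            · exact happK x h'
          · exact pvPass_snd_subset mo K hK _ F' x h)
      · apply pvReach_congr2 mo K hK
        · rw [hpass]
        · rw [hpass]
          show pvDF _ [] ((N ++ _) ++ (pvPass mo (PySem.Set.add P node) F').2) = _
          rw [List.append_assoc]

lemma pvLevels_eq_reach (mo : List (String × List String)) (K : List String)
    (hK : ∀ l o, o ∈ pvOrig mo l → o ∈ K) :
    ∀ (P F : List String) (hF : ∀ x ∈ F, x ∈ K),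
      (∀ x ∈ P, ∀ o ∈ pvOrig mo x, o ∈ P ∨ o ∈ F) →
      pvLevels mo K hK P F hF = pvReach mo K hK P (pvDF P [] F) (pvInv_df K P F hF) := by
  intro P F hF
  induction P, F, hF using pvLevels.induct mo K hK with
  | case1 P hF =>
    intro _
    rw [pvLevels, dif_pos rfl]
    have hnil : pvDF P [] ([] : List String) = [] := rfl
    rw [pvReach_congr2 mo K hK P P _ [] rfl hnil _ ⟨List.nodup_nil, by simp⟩]
    rw [pvReach]
  | case2 P F hF hne ih =>
    intro hinv
    rw [pvLevels]
    rw [dif_neg hne]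
    have hinv2 : ∀ x ∈ (pvPass mo P F).1, ∀ o ∈ pvOrig mo x,
        o ∈ (pvPass mo P F).1 ∨ o ∈ (pvPass mo P F).2 := by
      intro x hx o ho
      have := pvPass_inv mo F P [] (by
        intro y hy o' ho'
        rcases hinv y hy o' ho' with h | h
        · exact Or.inl h
        · exact Or.inr (Or.inl h)) x hx o ho
      rcases this with h | h | h
      · exact Or.inl h
      · exact Or.inr h
      · simp at h
    rw [ih hinv2]
    have step := pvPass_eq_reach mo K hK F P [] hF (by simp) (by
      intro x hx o ho
      rcases hinv x hx o ho with h | h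
      · exact Or.inl h
      · exact Or.inr (Or.inl h))
      (by rw [List.append_nil]; exact pvInv_df K P F hF)
      (by rw [List.nil_append]; exact pvInv_df K _ _ (pvPass_snd_subset mo K hK P F))
    refine Eq.trans ?_ (Eq.trans step.symm ?_)
    · apply pvReach_congr2 mo K hK
      · rfl
      · rw [List.nil_append]
    · apply pvReach_congr2 mo K hK
      · rfl
      · rw [List.append_nil]

lemma allModuleParents_eq (moduleOrigins : List (String × List String)) (label : String) :
    allModuleParents moduleOrigins label = allModuleParents_alt moduleOrigins label := by
  rw [allModuleParents, allModuleParents_alt]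
  rw [pvBfsA_eq_reach _ _ _ [] [label] _ (by simp)]
  rw [pvLevels_eq_reach _ _ _ [] [label] _ (by simp)]

-- ===== VERDICT (by name: the statement is the Claim_ definition above) =====
theorem allModuleParents_spec : Claim_equal_allModuleParents := by
  intro moduleOrigins label _hdom _hpre
  unfold Spec_allModuleParents
  exact allModuleParents_eq moduleOrigins label
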